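-- pv_equiv track=rewrite | github.com/mjordanaam/web_scrapping_twitter_telegram_mastodon_bot | text.py | get_length_and_number
-- ===== SOURCE A (Python) =====
-- def get_length_and_number(words: list) -> dict:
-- 	count = []
-- 	d = {}
-- 	w = list(words)
--
-- 	for e in w:
-- 		count.append(len(e))
--
-- 	count.sort()
--
-- 	for n in count:
-- 		if n not in d.keys():
-- 			d[n] = 1
-- 		else:
-- 			d[n] += 1
--
-- 	return d
-- ===== SOURCE B (Python) =====
-- def get_length_and_number(words: list) -> dict:
--     if not words:
--         return {}
--     m = max(len(w) for w in words)
--     counts = [0] * (m + 1)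
--     for w in words:
--         counts[len(w)] += 1
--     return {i: c for i, c in enumerate(counts) if c}
-- ===== Notes on version B (the rewrite author's own statement) =====
-- stated objective: faster
-- what changed: Replaces the sort of all lengths plus dict-membership counting by a frequency array indexed by word length, read off in index order (counting sort of the keys).
import Mathlib
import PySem

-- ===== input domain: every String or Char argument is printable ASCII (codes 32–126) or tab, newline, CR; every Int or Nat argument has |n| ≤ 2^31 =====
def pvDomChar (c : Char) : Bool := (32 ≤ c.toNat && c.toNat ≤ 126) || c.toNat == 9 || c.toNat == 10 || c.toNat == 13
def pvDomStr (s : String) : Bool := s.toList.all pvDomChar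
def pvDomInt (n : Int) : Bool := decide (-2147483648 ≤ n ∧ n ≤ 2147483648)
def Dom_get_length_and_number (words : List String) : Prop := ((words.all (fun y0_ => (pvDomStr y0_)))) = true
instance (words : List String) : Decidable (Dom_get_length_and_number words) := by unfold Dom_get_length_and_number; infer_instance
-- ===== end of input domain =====

-- B replaces A's sort of all lengths + dict-membership counting by a frequency array indexed by length, read off in index order (alternative algorithm).

-- ===== PORT A =====
def get_length_and_number (words : List String) : List (Int × Int) :=
  -- count = []; for e in w: count.append(len(e))
  let count : List Int := words.foldl (fun acc e => acc ++ [PySem.Str.len e]) []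
  -- count.sort()
  let count := PySem.List.sorted count (fun x => x) false
  -- for n in count: if n not in d.keys(): d[n] = 1 else: d[n] += 1
  let d := count.foldl
    (fun d n => if d.contains n = false then d.insert n 1 else d.insert n (d.getD n 0 + 1))
    PySem.Dict.empty
  d.items

-- ===== PORT B =====
def get_length_and_number_alt (words : List String) : List (Int × Int) :=
  if words = [] then []
  else
    let lens : List Int := words.map (fun w => PySem.Str.len w)
    -- m = max(len(w) for w in words); words ≠ [], so max? is some and the default is unreachable
    let m := (PySem.List.max? lens (fun x => x)).getD 0
    -- counts = [0] * (m + 1); for w in words: counts[len(w)] += 1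
    let counts := words.foldl
      (fun cs w => PySem.List.pySetD cs (PySem.Str.len w) (PySem.List.pyGetD cs (PySem.Str.len w) 0 + 1))
      (List.replicate (m + 1).toNat 0)
    -- {i: c for i, c in enumerate(counts) if c} — the indices are distinct and increasing,
    -- so the dict comprehension's items are exactly the kept (index, value) pairs
    (PySem.List.enumerate counts).filter (fun p => p.2 != 0)

-- ===== PRECONDITION & SPEC =====
def Spec_get_length_and_number (words : List String) (out : List (Int × Int)) : Prop := out = get_length_and_number_alt words
instance (words : List String) (out : List (Int × Int)) : Decidable (Spec_get_length_and_number words out) := by unfold Spec_get_length_and_number; infer_instance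

-- ===== CLAIM (what is proved, stated in full; the proofs are below) =====
def Claim_equal_get_length_and_number : Prop := ∀ (words : List String), Dom_get_length_and_number words → Spec_get_length_and_number words (get_length_and_number words)

-- ===== LEMMAS AND PROOFS =====

-- A's counting step is the standard counter step: when n is absent, getD n 0 = 0
theorem pvAStepEq : (fun (d : PySem.Dict Int Int) n => if d.contains n = false then d.insert n 1 else d.insert n (d.getD n 0 + 1)) = (fun (d : PySem.Dict Int Int) n => d.insert n (d.getD n 0 + 1)) := by
  funext d n
  by_cases h : d.contains n = false
  · have hg : d.get? n = none := (PySem.Dict.get?_eq_none_iff_contains d n).mpr h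
    simp [h, PySem.Dict.getD, hg]
  · simp [h]

-- A's result: the sorted-length counter's items
theorem pvAEq (words : List String) :
    get_length_and_number words =
      (PySem.Set.ofList (PySem.List.sorted (words.map (fun w => PySem.Str.len w)) (fun x => x) false)).map
        (fun k => (k, ((PySem.List.sorted (words.map (fun w => PySem.Str.len w)) (fun x => x) false).count k : Int))) := by
  unfold get_length_and_number
  simp only [PySem.List.foldl_append_singleton_eq_map, List.nil_append, pvAStepEq,
      PySem.Dict.foldl_insert_getD_add_one_eq_counter, PySem.Dict.items_counter]

theorem pvAddTrue {α : Type} [BEq α] (s : PySem.Set α) (x : α) (h : PySem.Set.contains s x = true) :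
    PySem.Set.add s x = s := by
  simp only [PySem.Set.add, h, if_true]

theorem pvAddFalse {α : Type} [BEq α] (s : PySem.Set α) (x : α) (h : PySem.Set.contains s x = false) :
    PySem.Set.add s x = s ++ [x] := by
  simp only [PySem.Set.add, h]
  simp

-- Set.ofList keeps a subsequence of its input
theorem pvFoldlAddSublist {α : Type} [BEq α] : ∀ (xs : List α) (s : List α),
    ∃ t, List.foldl PySem.Set.add s xs = s ++ t ∧ t.Sublist xs := by
  intro xs
  induction xs with
  | nil => intro s; exact ⟨[], by simp⟩
  | cons x xs ih =>
    intro s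
    cases hc : PySem.Set.contains s x with
    | true =>
      obtain ⟨t, ht, hs⟩ := ih s
      refine ⟨t, ?_, hs.cons x⟩
      rw [List.foldl_cons, pvAddTrue s x hc]
      exact ht
    | false =>
      obtain ⟨t, ht, hs⟩ := ih (s ++ [x])
      refine ⟨x :: t, ?_, hs.cons₂ x⟩
      rw [List.foldl_cons, pvAddFalse s x hc, ht, List.append_assoc]
      rfl

theorem pvOfListSublist {α : Type} [BEq α] (xs : List α) :
    List.Sublist (PySem.Set.ofList xs) xs := by
  obtain ⟨t, ht, hs⟩ := pvFoldlAddSublist xs (PySem.Set.empty)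
  have : PySem.Set.ofList xs = t := by simpa [PySem.Set.ofList, PySem.Set.empty] using ht
  rw [this]; exact hs

theorem pvOfListPairwiseLt (xs : List Int) (h : xs.Pairwise (· ≤ ·)) :
    (PySem.Set.ofList xs).Pairwise (· < ·) := by
  have hle : (PySem.Set.ofList xs).Pairwise (· ≤ ·) := h.sublist (pvOfListSublist xs)
  have hnd : (PySem.Set.ofList xs).Nodup := PySem.Set.nodup_ofList xs
  exact (hle.and hnd).imp (fun hab => lt_of_le_of_ne hab.1 hab.2)

-- the frequency-array fold computes counts
theorem pvCountsSpec : ∀ (ws : List String) (cs : List Int),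
    (∀ w ∈ ws, w.toList.length < cs.length) →
    (ws.foldl (fun cs w => cs.set w.toList.length (cs.getD w.toList.length 0 + 1)) cs).length = cs.length ∧
    ∀ i : Nat, (ws.foldl (fun cs w => cs.set w.toList.length (cs.getD w.toList.length 0 + 1)) cs).getD i 0
      = cs.getD i 0 + ((ws.map (fun w => (w.toList.length : Int))).count (i : Int) : Int) := by
  intro ws
  induction ws with
  | nil => intro cs _; simp
  | cons w ws ih =>
    intro cs h
    have hw : w.toList.length < cs.length := h w (by simp)
    have hlen' : (cs.set w.toList.length (cs.getD w.toList.length 0 + 1)).length = cs.length := by simp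
    obtain ⟨ihlen, ihget⟩ := ih (cs.set w.toList.length (cs.getD w.toList.length 0 + 1))
      (by intro v hv; rw [hlen']; exact h v (by simp [hv]))
    refine ⟨by simpa [hlen'] using ihlen, ?_⟩
    intro i
    rw [List.foldl_cons, ihget i]
    have hcount : ((List.map (fun w => (w.toList.length : Int)) (w :: ws)).count (i : Int) : Int)
        = ((ws.map (fun w => (w.toList.length : Int))).count (i : Int) : Int)
          + (if w.toList.length = i then 1 else 0) := by
      simp only [List.map_cons, List.count_cons]
      by_cases hwi : w.toList.length = i
      · simp [hwi]
      · have hne : ¬ ((w.toList.length : Int) = (i : Int)) := by exact_mod_cast hwi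
        simp [hne, hwi]
    rw [hcount]
    have hset : (cs.set w.toList.length (cs.getD w.toList.length 0 + 1)).getD i 0
        = cs.getD i 0 + (if w.toList.length = i then 1 else 0) := by
      by_cases hi : i < cs.length
      · rw [List.getD_eq_getElem _ _ (by simpa using hi), List.getD_eq_getElem _ _ hi,
            List.getElem_set]
        by_cases hwi : w.toList.length = i
        · rw [if_pos hwi, if_pos hwi, List.getD_eq_getElem _ _ hw]
          subst hwi
          simp
        · rw [if_neg hwi, if_neg hwi, add_zero]
      · have h1 : cs.length ≤ i := Nat.le_of_not_lt hi
        have hwi : w.toList.length ≠ i := by omega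
        rw [List.getD_eq_default _ _ (by simpa using h1), List.getD_eq_default _ _ h1,
            if_neg hwi, add_zero]
    rw [hset]; ring

-- a fold whose step keeps the accumulator `some` ends `some`
theorem pvFoldSome (f : Option Int → Int → Option Int)
    (hf : ∀ a x, ∃ b, f (some a) x = some b) :
    ∀ (xs : List Int) (a : Int), ∃ m, List.foldl f (some a) xs = some m := by
  intro xs
  induction xs with
  | nil => intro a; exact ⟨a, rfl⟩
  | cons x xs ih =>
    intro a
    obtain ⟨b, hb⟩ := hf a x
    rw [List.foldl_cons, hb]
    exact ih b

-- max? of a nonempty list is some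
theorem pvMaxSome (xs : List Int) (h : xs ≠ []) :
    ∃ m, PySem.List.max? xs (fun x => x) = some m := by
  match xs, h with
  | x :: xs, _ =>
    simp only [PySem.List.max?, List.foldl_cons]
    refine pvFoldSome _ (fun a y => ?_) xs x
    by_cases hlt : a < y
    · exact ⟨y, by simp [hlt]⟩
    · exact ⟨a, by simp [hlt]⟩

-- B's update step written with plain List.set / List.getD
theorem pvBStepEq : (fun (cs : List Int) w => PySem.List.pySetD cs (PySem.Str.len w) (PySem.List.pyGetD cs (PySem.Str.len w) 0 + 1)) = (fun (cs : List Int) w => cs.set w.toList.length (cs.getD w.toList.length 0 + 1)) := by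
  funext cs w
  simp [PySem.Str.len_eq]

-- ===== VERDICT (by name: the statement is the Claim_ definition above) =====
theorem get_length_and_number_spec : Claim_equal_get_length_and_number := by
  intro words _
  unfold Spec_get_length_and_number
  by_cases hw : words = []
  · subst hw; decide
  · -- abbreviations
    set L : List Int := words.map (fun w => PySem.Str.len w) with hL
    have hLne : L ≠ [] := by
      intro hnil
      exact hw (List.map_eq_nil_iff.mp (hL ▸ hnil))
    obtain ⟨mx, hmx⟩ : ∃ mx, PySem.List.max? L (fun x => x) = some mx := pvMaxSome L hLne
    have hmxmem : mx ∈ L := PySem.List.max?_mem hmx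
    have hmax : ∀ y ∈ L, y ≤ mx := by
      intro y hy; exact PySem.List.max?_isMax hmx y hy
    have hLnn : ∀ y ∈ L, 0 ≤ y := by
      intro y hy
      simp only [hL, List.mem_map] at hy
      obtain ⟨w, _, rfl⟩ := hy
      rw [PySem.Str.len_eq]; positivity
    have hmx0 : 0 ≤ mx := hLnn mx hmxmem
    -- the frequency array
    set counts : List Int := words.foldl
      (fun cs w => cs.set w.toList.length (cs.getD w.toList.length 0 + 1))
      (List.replicate (mx + 1).toNat 0) with hcounts
    have hbound : ∀ w ∈ words, w.toList.length < (List.replicate (mx + 1).toNat (0 : Int)).length := by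
      intro w hwmem
      have : (w.toList.length : Int) ≤ mx := by
        have : PySem.Str.len w ∈ L := by simp [hL]; exact ⟨w, hwmem, rfl⟩
        simpa [PySem.Str.len_eq] using hmax _ this
      simp only [List.length_replicate]
      omega
    obtain ⟨hclen, hcget⟩ := pvCountsSpec words (List.replicate (mx + 1).toNat 0) hbound
    have hL' : words.map (fun w => ((w.toList.length : Int))) = L := by
      simp [hL, PySem.Str.len_eq]
    have hcget' : ∀ i : Nat, counts.getD i 0 = (L.count (i : Int) : Int) := by
      intro i
      rw [hcounts, hcget i, hL']
      have : (List.replicate (mx + 1).toNat (0 : Int)).getD i 0 = 0 := by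
        rcases Nat.lt_or_ge i (mx + 1).toNat with h | h
        · rw [List.getD_eq_getElem _ _ (by simpa using h)]; simp
        · rw [List.getD_eq_default _ _ (by simpa using h)]
      rw [this, zero_add]
    have hclen' : PySem.List.len counts = mx + 1 := by
      rw [PySem.List.len_eq, hcounts, hclen]
      simp; omega
    -- evaluate B
    have hB : get_length_and_number_alt words =
        ((PySem.List.pyRange 0 (mx + 1)).filter (fun j => decide (j ∈ L))).map
          (fun j => (j, (L.count j : Int))) := by
      unfold get_length_and_number_alt
      rw [if_neg hw]
      simp only [← hL, hmx, Option.getD_some, pvBStepEq, ← hcounts]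
      rw [PySem.List.enumerate_eq_map_pyRange counts 0, hclen', List.filter_map]
      have hpt : ∀ j ∈ PySem.List.pyRange 0 (mx + 1), PySem.List.pyGetD counts j 0 = (L.count j : Int) := by
        intro j hj
        rw [PySem.List.mem_pyRange_one] at hj
        have hj' : j = ((j.toNat : Nat) : Int) := by omega
        rw [hj', PySem.List.pyGetD_natCast, hcget' j.toNat]
      have hq : ∀ j ∈ PySem.List.pyRange 0 (mx + 1),
          (((fun (p : Int × Int) => p.2 != 0) ∘ fun j => (j, PySem.List.pyGetD counts j 0)) j)
            = (fun j => decide (j ∈ L)) j := by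
        intro j hj
        simp only [Function.comp]
        rw [hpt j hj]
        by_cases hm : j ∈ L
        · have hpos : 0 < L.count j := List.count_pos_iff.mpr hm
          rw [decide_eq_true hm, bne_iff_ne]
          exact_mod_cast hpos.ne'
        · have hz : L.count j = 0 := List.count_eq_zero.mpr hm
          simp [hm, hz]
      rw [List.filter_congr hq]
      apply List.map_congr_left
      intro j hj
      have hj' := (List.mem_filter.mp hj).1
      rw [hpt j hj']
    -- evaluate A
    have hperm := PySem.List.sorted_perm L (fun x => x) false
    have hA : get_length_and_number words =
        (PySem.Set.ofList (PySem.List.sorted L (fun x => x) false)).map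
          (fun j => (j, (L.count j : Int))) := by
      rw [pvAEq words, ← hL]
      apply List.map_congr_left
      intro k _
      rw [hperm.count_eq k]
    -- the two key lists are equal
    have hK : PySem.Set.ofList (PySem.List.sorted L (fun x => x) false) =
        (PySem.List.pyRange 0 (mx + 1)).filter (fun j => decide (j ∈ L)) := by
      have p1 : (PySem.Set.ofList (PySem.List.sorted L (fun x => x) false)).Pairwise (· < ·) :=
        pvOfListPairwiseLt _ (PySem.List.sorted_pairwise L (fun x => x))
      have p2 : ((PySem.List.pyRange 0 (mx + 1)).filter (fun j => decide (j ∈ L))).Pairwise ((· < ·) : Int → Int → Prop) :=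
        (PySem.List.pairwise_lt_pyRange_one 0 (mx + 1)).filter _
      have nd1 : (PySem.Set.ofList (PySem.List.sorted L (fun x => x) false)).Nodup :=
        PySem.Set.nodup_ofList _
      have nd2 : ((PySem.List.pyRange 0 (mx + 1)).filter (fun j => decide (j ∈ L))).Nodup :=
        p2.imp (fun h => ne_of_lt h)
      have hmem : ∀ a : Int, a ∈ PySem.Set.ofList (PySem.List.sorted L (fun x => x) false) ↔
          a ∈ (PySem.List.pyRange 0 (mx + 1)).filter (fun j => decide (j ∈ L)) := by
        intro a
        rw [PySem.Set.mem_ofList, hperm.mem_iff, List.mem_filter, PySem.List.mem_pyRange_one]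
        constructor
        · intro ha
          exact ⟨⟨hLnn a ha, by have := hmax a ha; omega⟩, by simpa using ha⟩
        · intro ⟨_, ha⟩
          simpa using ha
      have hp : (PySem.Set.ofList (PySem.List.sorted L (fun x => x) false)).Perm
          ((PySem.List.pyRange 0 (mx + 1)).filter (fun j => decide (j ∈ L))) :=
        (List.perm_ext_iff_of_nodup nd1 nd2).mpr hmem
      exact List.Perm.eq_of_pairwise (fun a b _ _ h1 h2 => ((lt_asymm h1) h2).elim) p1 p2 hp
    rw [hA, hB, hK]
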